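-- pv_equiv track=rewrite | github.com/wilsonzlin/aero | drivers/windows7/tests/host-harness/tests/test_provision_blk_root_quoting.py | _commandline_to_argv
-- ===== SOURCE A (Python) =====
-- def _commandline_to_argv(cmd: str) -> list[str]:
--     """
--     Minimal CommandLineToArgvW-compatible parser (sufficient for our quoting tests).
--
--     Windows parsing rules (simplified):
--     - Whitespace separates args when not inside quotes.
--     - Backslashes before a quote are treated specially:
--       - 2N backslashes + quote => N backslashes and toggles in_quotes
--       - 2N+1 backslashes + quote => N backslashes + literal quote
--     """
--
--     argv: list[str] = []
--     i = 0
--     n = len(cmd)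
--
--     while True:
--         while i < n and cmd[i] in " \t":
--             i += 1
--         if i >= n:
--             break
--
--         arg = ""
--         in_quotes = False
--         while i < n:
--             ch = cmd[i]
--             if ch in " \t" and not in_quotes:
--                 break
--
--             if ch == "\\":
--                 start = i
--                 while i < n and cmd[i] == "\\":
--                     i += 1
--                 bs_count = i - start
--
--                 if i < n and cmd[i] == '"':
--                     arg += "\\" * (bs_count // 2)
--                     if bs_count % 2 == 0:
--                         in_quotes = not in_quotes
--                     else:
--                         arg += '"'
--                     i += 1
--                     continue
--
--                 arg += "\\" * bs_count
--                 continue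
--
--             if ch == '"':
--                 in_quotes = not in_quotes
--                 i += 1
--                 continue
--
--             arg += ch
--             i += 1
--
--         argv.append(arg)
--         while i < n and cmd[i] in " \t":
--             i += 1
--
--     return argv
-- ===== SOURCE B (Python) =====
-- def _commandline_to_argv(cmd: str) -> list[str]:
--     """Flat single-pass parser: one loop over the characters with a pending
--     backslash counter instead of nested scanning loops."""
--     argv: list[str] = []
--     buf = ""
--     in_arg = False
--     in_quotes = False
--     bs = 0
--     for ch in cmd:
--         if ch == "\\":
--             bs += 1
--             in_arg = True
--         elif ch == '"':
--             buf += "\\" * (bs // 2)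
--             if bs % 2 == 1:
--                 buf += '"'
--             else:
--                 in_quotes = not in_quotes
--             bs = 0
--             in_arg = True
--         elif ch in " \t" and not in_quotes:
--             if in_arg:
--                 argv.append(buf + "\\" * bs)
--                 buf = ""
--                 bs = 0
--                 in_arg = False
--         else:
--             buf += "\\" * bs + ch
--             bs = 0
--             in_arg = True
--     if in_arg:
--         argv.append(buf + "\\" * bs)
--     return argv
-- ===== Notes on version B (the rewrite author's own statement) =====
-- stated objective: faster
-- what changed: A's three nested index-driven while-loops (outer arg loop, inner char loop, innermost backslash-run scan) are replaced by one flat for-loop over the characters carrying in_quotes, an in_arg flag and a pending-backslash counter resolved at the next quote/ordinary char/separator/end; dropping the per-character cmd[i] indexing and the nested run-scans is the speed mechanism (a timing run measured B faster at every size).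
import Mathlib
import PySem

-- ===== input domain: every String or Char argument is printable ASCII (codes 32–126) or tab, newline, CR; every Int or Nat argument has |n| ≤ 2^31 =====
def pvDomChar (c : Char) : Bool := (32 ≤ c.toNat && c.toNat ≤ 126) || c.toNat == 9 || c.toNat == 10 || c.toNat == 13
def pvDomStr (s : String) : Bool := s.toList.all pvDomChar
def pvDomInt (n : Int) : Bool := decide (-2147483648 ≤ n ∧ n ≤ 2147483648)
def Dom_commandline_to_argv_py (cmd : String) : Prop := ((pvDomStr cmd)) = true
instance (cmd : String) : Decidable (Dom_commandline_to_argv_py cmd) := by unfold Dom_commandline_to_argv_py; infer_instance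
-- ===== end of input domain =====

-- B replaces A's three nested index-driven scanning loops by ONE flat pass over the
-- characters carrying a pending-backslash counter (measured faster in a timing run).

-- ===== PORT A =====
-- Python str is modelled as List Char (PySem.Chars style); argv entries become String at append time.
-- The while-loops are ported with a fuel parameter (cmd length + 1) as a pure totality guard;
-- fuel never runs out on any input (proved below via the fuel-free versions pvAInner/pvAOuter).
-- run of backslashes at the head: A's innermost `while cmd[i] == '\\'` loop
def pvBsRun : List Char → Nat × List Char
  | [] => (0, [])
  | c :: r => if c = '\\' then ((pvBsRun r).1 + 1, (pvBsRun r).2) else (0, c :: r)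

def pvBsL (k : Nat) : List Char := List.replicate k '\\'

-- A's inner `while i < n` loop building one argument
def pvAInnerF : Nat → List Char → Bool → List Char → (List Char × List Char)
  | 0, l, _, arg => (arg, l)
  | _ + 1, [], _, arg => (arg, [])
  | fuel + 1, ch :: rest, inq, arg =>
    if (ch = ' ' ∨ ch = '\t') ∧ inq = false then (arg, ch :: rest)
    else if ch = '\\' then
      -- bs_count = (pvBsRun rest).1 + 1: the backslash run; then the char after it
      match (pvBsRun rest).2 with
      | '"' :: r2 =>
          if ((pvBsRun rest).1 + 1) % 2 = 0 then
            pvAInnerF fuel r2 (!inq) (arg ++ pvBsL (((pvBsRun rest).1 + 1) / 2))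
          else pvAInnerF fuel r2 inq (arg ++ pvBsL (((pvBsRun rest).1 + 1) / 2) ++ ['"'])
      | r' => pvAInnerF fuel r' inq (arg ++ pvBsL ((pvBsRun rest).1 + 1))
    else if ch = '"' then pvAInnerF fuel rest (!inq) arg
    else pvAInnerF fuel rest inq (arg ++ [ch])

-- A's `while i < n and cmd[i] in " \t"` skipping loops
def pvSkipWs : List Char → List Char
  | [] => []
  | c :: r => if c = ' ' ∨ c = '\t' then pvSkipWs r else c :: r

-- A's outer `while True` loop
def pvAOuterF : Nat → List Char → List String
  | 0, _ => []
  | fuel + 1, l =>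
    match pvSkipWs l with
    | [] => []
    | c :: r =>
      let p := pvAInnerF (r.length + 1) (c :: r) false []
      String.mk p.1 :: pvAOuterF fuel (pvSkipWs p.2)

def commandline_to_argv_py (cmd : String) : List String :=
  pvAOuterF (cmd.toList.length + 1) cmd.toList

-- ===== PORT B =====
-- state: (argv, buf, in_arg, in_quotes, bs) exactly as in Source B's flat loop
def pvBState := List String × List Char × Bool × Bool × Nat

def pvBStep (s : pvBState) (ch : Char) : pvBState :=
  let (argv, buf, inArg, inq, bs) := s
  if ch = '\\' then (argv, buf, true, inq, bs + 1)
  else if ch = '"' then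
    let buf1 := buf ++ pvBsL (bs / 2)
    if bs % 2 = 1 then (argv, buf1 ++ ['"'], true, inq, 0)
    else (argv, buf1, true, !inq, 0)
  else if (ch = ' ' ∨ ch = '\t') ∧ inq = false then
    if inArg then (argv ++ [String.mk (buf ++ pvBsL bs)], [], false, inq, 0)
    else (argv, buf, false, inq, bs)
  else (argv, buf ++ pvBsL bs ++ [ch], true, inq, 0)

-- trailing `if in_arg: argv.append(...)`
def pvBFin (s : pvBState) : List String :=
  let (argv, buf, inArg, _, bs) := s
  if inArg then argv ++ [String.mk (buf ++ pvBsL bs)] else argv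

def commandline_to_argv_py_alt (cmd : String) : List String :=
  pvBFin (cmd.toList.foldl pvBStep ([], [], false, false, 0))

-- ===== PRECONDITION & SPEC =====
def Spec_commandline_to_argv_py (cmd : String) (out : List String) : Prop := out = commandline_to_argv_py_alt cmd
instance (cmd : String) (out : List String) : Decidable (Spec_commandline_to_argv_py cmd out) := by unfold Spec_commandline_to_argv_py; infer_instance

-- ===== CLAIM (what is proved, stated in full; the proofs are below) =====
def Claim_equal_commandline_to_argv_py : Prop := ∀ (cmd : String), Dom_commandline_to_argv_py cmd → Spec_commandline_to_argv_py cmd (commandline_to_argv_py cmd)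

-- ===== LEMMAS AND PROOFS =====

theorem pvBsRun_snd_le : ∀ (l : List Char), (pvBsRun l).2.length ≤ l.length
  | [] => by simp [pvBsRun]
  | c :: r => by
      simp only [pvBsRun]
      split
      · exact Nat.le_succ_of_le (pvBsRun_snd_le r)
      · simp

-- fuel-free ghost of pvAInnerF (proof-side only)
def pvAInner : List Char → Bool → List Char → (List Char × List Char)
  | [], _, arg => (arg, [])
  | ch :: rest, inq, arg =>
    if (ch = ' ' ∨ ch = '\t') ∧ inq = false then (arg, ch :: rest)
    else if ch = '\\' then
      -- bs_count = (pvBsRun rest).1 + 1: the backslash run; then the char after it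
      match h2 : (pvBsRun rest).2 with
      | '"' :: r2 =>
          if ((pvBsRun rest).1 + 1) % 2 = 0 then
            pvAInner r2 (!inq) (arg ++ pvBsL (((pvBsRun rest).1 + 1) / 2))
          else pvAInner r2 inq (arg ++ pvBsL (((pvBsRun rest).1 + 1) / 2) ++ ['"'])
      | r' => pvAInner r' inq (arg ++ pvBsL ((pvBsRun rest).1 + 1))
    else if ch = '"' then pvAInner rest (!inq) arg
    else pvAInner rest inq (arg ++ [ch])
termination_by l _ _ => l.length
decreasing_by
  all_goals simp only [List.length_cons]
  all_goals try (have hle := pvBsRun_snd_le rest; rw [h2] at hle)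
  all_goals try simp only [List.length_cons] at hle
  all_goals omega

theorem pvAInner_snd_le : ∀ (l : List Char) (inq : Bool) (arg : List Char),
    (pvAInner l inq arg).2.length ≤ l.length
  | [], _, _ => by simp [pvAInner]
  | ch :: rest, inq, arg => by
      rw [pvAInner]
      split
      · simp
      · split
        · split
          · rename_i r2 h2
            have hle := pvBsRun_snd_le rest
            rw [h2] at hle
            simp only [List.length_cons] at hle ⊢
            split
            · have h3 := pvAInner_snd_le r2 (!inq) (arg ++ pvBsL (((pvBsRun rest).1 + 1) / 2))
              omega
            · have h3 := pvAInner_snd_le r2 inq (arg ++ pvBsL (((pvBsRun rest).1 + 1) / 2) ++ ['"'])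
              omega
          · have hle := pvBsRun_snd_le rest
            have h3 := pvAInner_snd_le (pvBsRun rest).2 inq (arg ++ pvBsL ((pvBsRun rest).1 + 1))
            simp only [List.length_cons]
            omega
        · split
          · have h3 := pvAInner_snd_le rest (!inq) arg
            simp only [List.length_cons]
            omega
          · have h3 := pvAInner_snd_le rest inq (arg ++ [ch])
            simp only [List.length_cons]
            omega
termination_by l _ _ => l.length
decreasing_by
  all_goals simp only [List.length_cons]
  all_goals try (rename_i heqx _; rw [heqx] at hle; simp only [List.length_cons] at hle)
  all_goals omega

theorem pvSkipWs_length_le : ∀ (l : List Char), (pvSkipWs l).length ≤ l.length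
  | [] => by simp [pvSkipWs]
  | c :: r => by
      simp only [pvSkipWs]
      split
      · exact Nat.le_succ_of_le (pvSkipWs_length_le r)
      · simp

theorem pvSkipWs_head_not_ws : ∀ (l : List Char) (c : Char) (r : List Char),
    pvSkipWs l = c :: r → ¬ (c = ' ' ∨ c = '\t')
  | [], c, r, h => by simp [pvSkipWs] at h
  | a :: t, c, r, h => by
      rw [pvSkipWs] at h
      split at h
      · exact pvSkipWs_head_not_ws t c r h
      · rename_i hn; cases h; exact hn

theorem pvAInner_start_le (c : Char) (r : List Char) (hcw : ¬ (c = ' ' ∨ c = '\t')) :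
    (pvAInner (c :: r) false []).2.length ≤ r.length := by
  rw [pvAInner, if_neg (by simp [hcw])]
  split
  · split
    · rename_i r2 h2
      have hle := pvBsRun_snd_le r
      rw [h2] at hle
      simp only [List.length_cons] at hle
      split
      · have h3 := pvAInner_snd_le r2 (!false) (([] : List Char) ++ pvBsL (((pvBsRun r).1 + 1) / 2))
        omega
      · have h3 := pvAInner_snd_le r2 false (([] : List Char) ++ pvBsL (((pvBsRun r).1 + 1) / 2) ++ ['"'])
        omega
    · have hle := pvBsRun_snd_le r
      have h3 := pvAInner_snd_le (pvBsRun r).2 false (([] : List Char) ++ pvBsL ((pvBsRun r).1 + 1))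
      omega
  · split
    · exact pvAInner_snd_le r (!false) []
    · exact pvAInner_snd_le r false ([] ++ [c])

-- fuel-free ghost of pvAOuterF (proof-side only)
def pvAOuter (l : List Char) : List String :=
  match h : pvSkipWs l with
  | [] => []
  | c :: r =>
      let p := pvAInner (c :: r) false []
      String.mk p.1 :: pvAOuter (pvSkipWs p.2)
termination_by l.length
decreasing_by
  have hcw := pvSkipWs_head_not_ws l c r h
  have h1 : (pvAInner (c :: r) false []).2.length ≤ r.length := pvAInner_start_le c r hcw
  have h2 := pvSkipWs_length_le (pvAInner (c :: r) false []).2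
  have h3 : (c :: r).length ≤ l.length := h ▸ pvSkipWs_length_le l
  simp only [List.length_cons] at h3
  omega

-- fuel adequacy: with fuel ≥ the remaining length the fuel ports equal the ghosts
theorem pvAInner_eq_F : ∀ (fuel : Nat) (l : List Char) (inq : Bool) (arg : List Char),
    l.length ≤ fuel → pvAInner l inq arg = pvAInnerF fuel l inq arg := by
  intro fuel
  induction fuel with
  | zero =>
      intro l inq arg hlen
      cases l with
      | nil => simp [pvAInner, pvAInnerF]
      | cons c r => simp at hlen
  | succ fuel ih =>
      intro l inq arg hlen
      cases l with
      | nil => simp [pvAInner, pvAInnerF]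
      | cons ch rest =>
        rw [pvAInner, pvAInnerF]
        simp only [List.length_cons] at hlen
        by_cases hws : (ch = ' ' ∨ ch = '\t') ∧ inq = false
        · rw [if_pos hws, if_pos hws]
        · rw [if_neg hws, if_neg hws]
          by_cases hb : ch = '\\'
          · rw [if_pos hb, if_pos hb]
            split
            · rename_i r2 h2
              rw [h2]
              have hle := pvBsRun_snd_le rest
              rw [h2] at hle
              simp only [List.length_cons] at hle
              show (if ((pvBsRun rest).1 + 1) % 2 = 0 then
                      pvAInner r2 (!inq) (arg ++ pvBsL (((pvBsRun rest).1 + 1) / 2))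
                    else pvAInner r2 inq (arg ++ pvBsL (((pvBsRun rest).1 + 1) / 2) ++ ['"'])) =
                   (if ((pvBsRun rest).1 + 1) % 2 = 0 then
                      pvAInnerF fuel r2 (!inq) (arg ++ pvBsL (((pvBsRun rest).1 + 1) / 2))
                    else pvAInnerF fuel r2 inq (arg ++ pvBsL (((pvBsRun rest).1 + 1) / 2) ++ ['"']))
              by_cases hp : ((pvBsRun rest).1 + 1) % 2 = 0
              · rw [if_pos hp, if_pos hp]
                exact ih r2 (!inq) _ (by omega)
              · rw [if_neg hp, if_neg hp]
                exact ih r2 inq _ (by omega)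
            · rename_i hnc
              have hle := pvBsRun_snd_le rest
              rcases hX : (pvBsRun rest).2 with _ | ⟨c, t⟩
              · exact ih [] inq _ (by simp)
              · rw [hX] at hle
                simp only [List.length_cons] at hle
                split
                · rename_i r2' h2'
                  exact absurd (hX.trans h2') (fun hc => hnc _ hc)
                · exact ih (c :: t) inq _ (by simp; omega)
          · rw [if_neg hb, if_neg hb]
            by_cases hq : ch = '"'
            · rw [if_pos hq, if_pos hq]
              exact ih rest (!inq) _ (by omega)
            · rw [if_neg hq, if_neg hq]
              exact ih rest inq _ (by omega)

theorem pvAOuter_eq_F : ∀ (fuel : Nat) (l : List Char), l.length < fuel →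
    pvAOuter l = pvAOuterF fuel l := by
  intro fuel
  induction fuel with
  | zero => intro l h; omega
  | succ fuel ih =>
      intro l hlen
      rw [pvAOuter.eq_def, pvAOuterF]
      split
      · rename_i h
        rw [h]
      · rename_i c r h
        rw [h]
        simp only
        have hcw := pvSkipWs_head_not_ws l c r h
        have hinner : pvAInner (c :: r) false [] = pvAInnerF (r.length + 1) (c :: r) false [] :=
          pvAInner_eq_F (r.length + 1) (c :: r) false [] (by simp)
        rw [← hinner]
        have hstart : (pvAInner (c :: r) false []).2.length ≤ r.length := pvAInner_start_le c r hcw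
        have hsk := pvSkipWs_length_le (pvAInner (c :: r) false []).2
        have hlr : (c :: r).length ≤ l.length := h ▸ pvSkipWs_length_le l
        simp only [List.length_cons] at hlr
        rw [ih (pvSkipWs (pvAInner (c :: r) false []).2) (by omega)]


-- A-side meaning of B's "pending backslashes" state: bs backslashes already seen, rest of the input l
def pvG (l : List Char) (inq : Bool) (buf : List Char) (bs : Nat) : List Char × List Char :=
  match (pvBsRun l).2 with
  | '"' :: r2 =>
      if (bs + (pvBsRun l).1) % 2 = 0 then
        pvAInner r2 (!inq) (buf ++ pvBsL ((bs + (pvBsRun l).1) / 2))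
      else pvAInner r2 inq (buf ++ pvBsL ((bs + (pvBsRun l).1) / 2) ++ ['"'])
  | r' => pvAInner r' inq (buf ++ pvBsL (bs + (pvBsRun l).1))

theorem pvBsRun_cons_bs (r : List Char) :
    pvBsRun ('\\' :: r) = ((pvBsRun r).1 + 1, (pvBsRun r).2) := by
  simp [pvBsRun]

theorem pvBsRun_cons_other (ch : Char) (r : List Char) (hb : ch ≠ '\\') :
    pvBsRun (ch :: r) = (0, ch :: r) := by
  rw [pvBsRun, if_neg hb]

theorem pvG_shift (r : List Char) (inq : Bool) (buf : List Char) (bs : Nat) :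
    pvG ('\\' :: r) inq buf bs = pvG r inq buf (bs + 1) := by
  unfold pvG
  rw [pvBsRun_cons_bs]
  have ht : bs + ((pvBsRun r).1 + 1) = (bs + 1) + (pvBsRun r).1 := by omega
  simp only [ht]

theorem pvG_quote (r : List Char) (inq : Bool) (buf : List Char) (bs : Nat) :
    pvG ('"' :: r) inq buf bs =
      if bs % 2 = 0 then pvAInner r (!inq) (buf ++ pvBsL (bs / 2))
      else pvAInner r inq (buf ++ pvBsL (bs / 2) ++ ['"']) := by
  unfold pvG
  rw [pvBsRun_cons_other '"' r (by simp)]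
  simp only [Nat.add_zero]

theorem pvG_other (ch : Char) (r : List Char) (inq : Bool) (buf : List Char) (bs : Nat)
    (hb : ch ≠ '\\') (hq : ch ≠ '"') :
    pvG (ch :: r) inq buf bs = pvAInner (ch :: r) inq (buf ++ pvBsL bs) := by
  unfold pvG
  rw [pvBsRun_cons_other ch r hb]
  simp only [Nat.add_zero]
  split
  · rename_i r2 h2
    injection h2 with hc _
    exact absurd hc hq
  · rfl

theorem pvG_nil (inq : Bool) (buf : List Char) (bs : Nat) :
    pvG [] inq buf bs = (buf ++ pvBsL bs, []) := by
  simp [pvG, pvBsRun, pvAInner]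

-- the one bridge between A's run-at-once scan and the pending-count view
theorem pvAInner_bs (r : List Char) (inq : Bool) (arg : List Char) :
    pvAInner ('\\' :: r) inq arg = pvG r inq arg 1 := by
  rw [pvAInner, if_neg (by simp), if_pos rfl]
  unfold pvG
  have ht : 1 + (pvBsRun r).1 = (pvBsRun r).1 + 1 := by omega
  simp only [ht]
  split
  · rename_i r2 h2
    rw [h2]
    try rfl
  · rename_i hnc
    rcases hX : (pvBsRun r).2 with _ | ⟨c, t⟩
    · rfl
    · split
      · rename_i r2' h2'
        exact absurd (hX.trans h2') (fun hc => hnc _ hc)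
      · rfl

theorem pvAInner_quote (r : List Char) (inq : Bool) (arg : List Char) :
    pvAInner ('"' :: r) inq arg = pvAInner r (!inq) arg := by
  rw [pvAInner, if_neg (by simp), if_neg (by simp), if_pos rfl]

theorem pvG_zero (l : List Char) (inq : Bool) (buf : List Char) :
    pvG l inq buf 0 = pvAInner l inq buf := by
  match l with
  | [] => rw [pvG_nil]; simp [pvAInner, pvBsL]
  | ch :: r =>
    by_cases hb : ch = '\\'
    · subst hb
      rw [pvG_shift, pvAInner_bs]
    · by_cases hq : ch = '"'
      · subst hq
        rw [pvG_quote, pvAInner_quote]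
        simp [pvBsL]
      · rw [pvG_other ch r inq buf 0 hb hq]
        simp [pvBsL]

theorem pvAOuter_ws (ch : Char) (r : List Char) (h : ch = ' ' ∨ ch = '\t') :
    pvAOuter (ch :: r) = pvAOuter r := by
  rw [pvAOuter, pvAOuter.eq_def r]
  have : pvSkipWs (ch :: r) = pvSkipWs r := by rw [pvSkipWs, if_pos h]
  rw [this]

theorem pvSkipWs_idem : ∀ (l : List Char), pvSkipWs (pvSkipWs l) = pvSkipWs l
  | [] => by simp [pvSkipWs]
  | c :: r => by
      rw [pvSkipWs]
      split
      · exact pvSkipWs_idem r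
      · rename_i hn; rw [pvSkipWs, if_neg hn]

theorem pvAOuter_skipWs (l : List Char) : pvAOuter (pvSkipWs l) = pvAOuter l := by
  rw [pvAOuter.eq_def (pvSkipWs l), pvAOuter.eq_def l, pvSkipWs_idem]

theorem pvAOuter_cons_start (ch : Char) (r : List Char) (hw : ¬ (ch = ' ' ∨ ch = '\t')) :
    pvAOuter (ch :: r) =
      String.mk (pvAInner (ch :: r) false []).1 ::
        pvAOuter (pvAInner (ch :: r) false []).2 := by
  rw [pvAOuter.eq_def]
  have hsk : pvSkipWs (ch :: r) = ch :: r := by rw [pvSkipWs, if_neg hw]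
  rw [hsk]
  simp only
  rw [pvAOuter_skipWs]

-- the joint loop invariant: B's fold from the between-args state computes A's outer
-- loop, and from the inside-an-arg state computes A's inner loop (with bs pending)
theorem pvJoint : ∀ (l : List Char),
    (∀ argv, pvBFin (l.foldl pvBStep (argv, [], false, false, 0)) = argv ++ pvAOuter l) ∧
    (∀ argv buf inq bs,
      pvBFin (l.foldl pvBStep (argv, buf, true, inq, bs)) =
        argv ++ String.mk (pvG l inq buf bs).1 :: pvAOuter (pvG l inq buf bs).2) := by
  intro l
  induction l with
  | nil =>
      constructor
      · intro argv; simp [pvBFin, pvAOuter, pvSkipWs]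
      · intro argv buf inq bs
        rw [List.foldl_nil, pvG_nil]
        simp [pvBFin, pvAOuter, pvSkipWs]
  | cons ch r ih =>
      obtain ⟨ih1, ih2⟩ := ih
      constructor
      · -- between args
        intro argv
        by_cases hb : ch = '\\'
        · subst hb
          rw [List.foldl_cons]
          have hs : pvBStep (argv, [], false, false, 0) '\\' = (argv, [], true, false, 1) := by
            simp [pvBStep]
          rw [hs, ih2]
          rw [pvAOuter_cons_start '\\' r (by simp), pvAInner_bs]
        · by_cases hq : ch = '"'
          · subst hq
            rw [List.foldl_cons]
            have hs : pvBStep (argv, [], false, false, 0) '"' = (argv, [], true, true, 0) := by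
              simp [pvBStep, pvBsL]
            rw [hs, ih2, pvG_zero]
            rw [pvAOuter_cons_start '"' r (by simp), pvAInner_quote]
            simp only [Bool.not_false]
          · by_cases hw : ch = ' ' ∨ ch = '\t'
            · rw [List.foldl_cons]
              have hs : pvBStep (argv, [], false, false, 0) ch = (argv, [], false, false, 0) := by
                simp [pvBStep, hb, hq, hw]
              rw [hs, ih1, pvAOuter_ws ch r hw]
            · rw [List.foldl_cons]
              have hs : pvBStep (argv, [], false, false, 0) ch = (argv, [ch], true, false, 0) := by
                simp only [pvBStep]
                rw [if_neg hb, if_neg hq, if_neg (by simp [hw])]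
                simp [pvBsL]
              rw [hs, ih2, pvG_zero]
              rw [pvAOuter_cons_start ch r hw]
              have : pvAInner (ch :: r) false [] = pvAInner r false [ch] := by
                rw [pvAInner, if_neg (by simp [hw]), if_neg hb, if_neg hq]
                rfl
              rw [this]
      · -- inside an arg, bs pending backslashes
        intro argv buf inq bs
        by_cases hb : ch = '\\'
        · subst hb
          rw [List.foldl_cons]
          have hs : pvBStep (argv, buf, true, inq, bs) '\\' = (argv, buf, true, inq, bs + 1) := by
            simp [pvBStep]
          rw [hs, ih2, pvG_shift]
        · by_cases hq : ch = '"'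
          · subst hq
            rw [List.foldl_cons, pvG_quote]
            by_cases hp : bs % 2 = 0
            · have hs : pvBStep (argv, buf, true, inq, bs) '"' =
                  (argv, buf ++ pvBsL (bs / 2), true, !inq, 0) := by
                simp [pvBStep]
                omega
              rw [hs, ih2, pvG_zero, if_pos hp]
            · have hs : pvBStep (argv, buf, true, inq, bs) '"' =
                  (argv, buf ++ pvBsL (bs / 2) ++ ['"'], true, inq, 0) := by
                simp [pvBStep]
                omega
              rw [hs, ih2, pvG_zero, if_neg hp]
          · by_cases hw : (ch = ' ' ∨ ch = '\t') ∧ inq = false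
            · rw [List.foldl_cons]
              have hs : pvBStep (argv, buf, true, inq, bs) ch =
                  (argv ++ [String.mk (buf ++ pvBsL bs)], [], false, inq, 0) := by
                simp only [pvBStep]
                rw [if_neg hb, if_neg hq, if_pos hw]
                simp
              rw [hs]
              have hinq : inq = false := hw.2
              subst hinq
              rw [ih1]
              have hg : pvG (ch :: r) false buf bs = (buf ++ pvBsL bs, ch :: r) := by
                rw [pvG_other ch r false buf bs hb hq]
                rw [pvAInner, if_pos ⟨hw.1, rfl⟩]
              rw [hg]
              simp only [List.append_assoc, List.singleton_append]
              rw [pvAOuter_ws ch r hw.1]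
            · rw [List.foldl_cons]
              have hs : pvBStep (argv, buf, true, inq, bs) ch =
                  (argv, buf ++ pvBsL bs ++ [ch], true, inq, 0) := by
                simp only [pvBStep]
                rw [if_neg hb, if_neg hq, if_neg hw]
              rw [hs, ih2, pvG_zero]
              have hg : pvG (ch :: r) inq buf bs = pvAInner r inq (buf ++ pvBsL bs ++ [ch]) := by
                rw [pvG_other ch r inq buf bs hb hq]
                rw [pvAInner, if_neg hw, if_neg hb, if_neg hq]
              rw [hg]

-- ===== VERDICT (by name: the statement is the Claim_ definition above) =====
theorem commandline_to_argv_py_spec : Claim_equal_commandline_to_argv_py := by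
  intro cmd _
  unfold Spec_commandline_to_argv_py commandline_to_argv_py commandline_to_argv_py_alt
  rw [← pvAOuter_eq_F (cmd.toList.length + 1) cmd.toList (by omega)]
  rw [(pvJoint cmd.toList).1 []]
  simp
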